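-- pv_equiv track=rewrite | github.com/nitinksah/namematch | text_similarity.py | digit2Char
-- ===== SOURCE A (Python) =====
-- digit_mapping = {
--     "1": "a",
--     "2": "b",
--     "3": "c",
--     "4": "d",
--     "5": "e",
--     "6": "f",
--     "7": "g",
--     "8": "h",
--     "9": "i",
--     "0": "j",
-- }
--
-- def digit2Char(sentence):
--     x = list(sentence)
--     for idx, key in enumerate(digit_mapping):
--         try:
--             digit_idx = x.index(key)
--         except:
--             continue
--         x[digit_idx] = digit_mapping[key]
--
--     x = "".join(x)
--     return x
-- ===== SOURCE B (Python) =====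
-- digit_mapping = {
--     "1": "a",
--     "2": "b",
--     "3": "c",
--     "4": "d",
--     "5": "e",
--     "6": "f",
--     "7": "g",
--     "8": "h",
--     "9": "i",
--     "0": "j",
-- }
--
-- def digit2Char(sentence):
--     seen = set()
--     out = []
--     for ch in sentence:
--         if ch in digit_mapping and ch not in seen:
--             out.append(digit_mapping[ch])
--             seen.add(ch)
--         else:
--             out.append(ch)
--     return "".join(out)
-- ===== Notes on version B (the rewrite author's own statement) =====
-- stated objective: simpler
-- what changed: Replaces A's ten list.index scans (one per digit key, with try/except and in-place assignment) by a single forward pass over the characters that keeps a set of already-replaced digits and builds the output directly.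
import Mathlib
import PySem

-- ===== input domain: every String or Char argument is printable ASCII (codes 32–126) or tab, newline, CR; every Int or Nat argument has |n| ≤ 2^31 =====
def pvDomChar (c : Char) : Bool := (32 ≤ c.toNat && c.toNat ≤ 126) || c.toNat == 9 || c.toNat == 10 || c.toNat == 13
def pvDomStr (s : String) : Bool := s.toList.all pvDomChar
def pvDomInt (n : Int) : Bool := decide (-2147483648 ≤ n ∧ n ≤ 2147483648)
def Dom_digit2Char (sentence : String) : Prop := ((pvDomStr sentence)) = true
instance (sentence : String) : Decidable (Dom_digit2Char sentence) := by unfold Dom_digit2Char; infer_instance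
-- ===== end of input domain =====

-- B replaces A's ten list.index scans by one forward pass with a seen-set; return values proved equal on all inputs.

-- shared module constant: the literal digit_mapping dict
def digitMapping : PySem.Dict Char Char :=
  PySem.Dict.ofList [('1','a'),('2','b'),('3','c'),('4','d'),('5','e'),('6','f'),('7','g'),('8','h'),('9','i'),('0','j')]

-- ===== PORT A =====
-- one iteration of A's `for idx, key in enumerate(digit_mapping)` body (try x.index / except continue / assign);
-- digit_mapping[key] is ported as getD key key: key is always a key of the dict, so the default is never used
def digit2CharStep (x : List Char) (key : Char) : List Char :=
  match PySem.List.index? x key with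
  | none => x
  | some i => x.set i (digitMapping.getD key key)

def digit2Char (sentence : String) : String :=
  let x := sentence.toList
  let x := (PySem.Dict.keys digitMapping).foldl digit2CharStep x
  String.mk x

-- ===== PORT B =====
def digit2Char_alt (sentence : String) : String :=
  let r := sentence.toList.foldl
    (fun (acc : PySem.Set Char × List Char) ch =>
      if digitMapping.contains ch && !(PySem.Set.contains acc.1 ch) then
        (PySem.Set.add acc.1 ch, acc.2 ++ [digitMapping.getD ch ch])
      else
        (acc.1, acc.2 ++ [ch]))
    (PySem.Set.empty, [])
  String.mk r.2

-- ===== PRECONDITION & SPEC =====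
def Spec_digit2Char (sentence : String) (out : String) : Prop := out = digit2Char_alt sentence
instance (sentence : String) (out : String) : Decidable (Spec_digit2Char sentence out) := by unfold Spec_digit2Char; infer_instance

-- ===== CLAIM (what is proved, stated in full; the proofs are below) =====
def Claim_equal_digit2Char : Prop := ∀ (sentence : String), Dom_digit2Char sentence → Spec_digit2Char sentence (digit2Char sentence)

-- ===== LEMMAS AND PROOFS =====

-- B as a direct recursion (proof-side reformulation of B's loop)
def goB (seen : PySem.Set Char) : List Char → List Char
  | [] => []
  | c :: l =>
    if digitMapping.contains c && !(PySem.Set.contains seen c) then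
      digitMapping.getD c c :: goB (PySem.Set.add seen c) l
    else
      c :: goB seen l

theorem foldlB_eq_goB (l : List Char) (seen : PySem.Set Char) (out : List Char) :
    (l.foldl
      (fun (acc : PySem.Set Char × List Char) ch =>
        if digitMapping.contains ch && !(PySem.Set.contains acc.1 ch) then
          (PySem.Set.add acc.1 ch, acc.2 ++ [digitMapping.getD ch ch])
        else
          (acc.1, acc.2 ++ [ch]))
      (seen, out)).2 = out ++ goB seen l := by
  induction l generalizing seen out with
  | nil => simp [goB]
  | cons c l ih =>
    simp only [List.foldl_cons, goB]
    by_cases h : (digitMapping.contains c && !(PySem.Set.contains seen c)) = true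
    · rw [if_pos h, ih, if_pos h]; simp
    · rw [if_neg h, ih, if_neg h]; simp

theorem foldlA_nil (K : List Char) : K.foldl digit2CharStep [] = [] := by
  induction K with
  | nil => rfl
  | cons k K ih => simpa [digit2CharStep, PySem.List.index?] using ih

theorem step_cons_of_ne (l : List Char) (c k : Char) (h : k ≠ c) :
    digit2CharStep (c :: l) k = c :: digit2CharStep l k := by
  unfold digit2CharStep
  rw [PySem.List.index?_cons_of_ne l h.symm]
  cases PySem.List.index? l k with
  | none => rfl
  | some i => rfl

theorem foldlA_head_miss (K : List Char) (l : List Char) (c : Char) (h : c ∉ K) :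
    K.foldl digit2CharStep (c :: l) = c :: K.foldl digit2CharStep l := by
  induction K generalizing l with
  | nil => rfl
  | cons k K ih =>
    have hk : k ≠ c := fun e => h (e ▸ List.mem_cons_self)
    simp only [List.foldl_cons, step_cons_of_ne l c k hk]
    exact ih _ (fun m => h (List.mem_cons_of_mem _ m))

-- mapped letters are never digit keys
theorem getD_not_key (c : Char) (hc : c ∈ digitMapping.keys) :
    digitMapping.getD c c ∉ digitMapping.keys := by
  fin_cases hc <;> decide

theorem foldlA_head_hit (K : List Char) (l : List Char) (c : Char)
    (hmem : c ∈ K) (hnd : K.Nodup) (hsub : K ⊆ digitMapping.keys) :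
    K.foldl digit2CharStep (c :: l) =
      digitMapping.getD c c :: (K.erase c).foldl digit2CharStep l := by
  induction K generalizing l with
  | nil => cases hmem
  | cons k K ih =>
    by_cases hk : k = c
    · subst hk
      have h1 : digit2CharStep (k :: l) k = digitMapping.getD k k :: l := by
        unfold digit2CharStep
        rw [PySem.List.index?_cons_self]
        rfl
      have hout : digitMapping.getD k k ∉ K := fun m =>
        getD_not_key k (hsub List.mem_cons_self) (hsub (List.mem_cons_of_mem _ m))
      simp only [List.foldl_cons, h1, List.erase_cons_head]
      exact foldlA_head_miss K l _ hout
    · have hc : c ∈ K := by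
        cases List.mem_cons.mp hmem with
        | inl e => exact absurd e.symm hk
        | inr m => exact m
      have herase : (k :: K).erase c = k :: K.erase c :=
        List.erase_cons_tail (by simp [hk])
      simp only [List.foldl_cons, step_cons_of_ne l c k hk, herase]
      exact ih _ hc hnd.of_cons (fun x m => hsub (List.mem_cons_of_mem _ m))

theorem main_eq (l : List Char) (seen : PySem.Set Char) (K : List Char)
    (hnd : K.Nodup) (hsub : K ⊆ digitMapping.keys)
    (hrel : ∀ c, c ∈ K ↔ (digitMapping.contains c = true ∧ PySem.Set.contains seen c = false)) :
    K.foldl digit2CharStep l = goB seen l := by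
  induction l generalizing seen K with
  | nil => simpa [goB] using foldlA_nil K
  | cons c l ih =>
    by_cases h : (digitMapping.contains c = true ∧ PySem.Set.contains seen c = false)
    · have hc : c ∈ K := (hrel c).mpr h
      rw [foldlA_head_hit K l c hc hnd hsub]
      unfold goB
      rw [if_pos (by rw [h.1, h.2]; rfl)]
      congr 1
      apply ih
      · exact hnd.erase c
      · exact fun x m => hsub (List.mem_of_mem_erase m)
      · intro x
        rw [hnd.mem_erase_iff, hrel x]
        constructor
        · rintro ⟨hne, hdm, hs⟩
          refine ⟨hdm, ?_⟩
          simp only [PySem.Set.contains_eq_listContains, List.contains_eq_mem,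
            decide_eq_false_iff_not, PySem.Set.mem_add] at hs ⊢
          tauto
        · rintro ⟨hdm, hs⟩
          simp only [PySem.Set.contains_eq_listContains, List.contains_eq_mem,
            decide_eq_false_iff_not, PySem.Set.mem_add] at hs
          refine ⟨?_, hdm, ?_⟩
          · intro e; exact hs (Or.inr e)
          · simp only [PySem.Set.contains_eq_listContains, List.contains_eq_mem,
              decide_eq_false_iff_not]
            intro m; exact hs (Or.inl m)
    · have hc : c ∉ K := fun m => h ((hrel c).mp m)
      rw [foldlA_head_miss K l c hc]
      unfold goB
      rw [if_neg (by
        intro hb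
        simp only [Bool.and_eq_true, Bool.not_eq_true'] at hb
        exact h hb)]
      congr 1
      exact ih seen K hnd hsub hrel

-- ===== VERDICT (by name: the statement is the Claim_ definition above) =====
theorem digit2Char_spec : Claim_equal_digit2Char := by
  intro s _
  unfold Spec_digit2Char
  show String.mk (digitMapping.keys.foldl digit2CharStep s.toList) =
    String.mk (s.toList.foldl
      (fun (acc : PySem.Set Char × List Char) ch =>
        if digitMapping.contains ch && !(PySem.Set.contains acc.1 ch) then
          (PySem.Set.add acc.1 ch, acc.2 ++ [digitMapping.getD ch ch])
        else
          (acc.1, acc.2 ++ [ch]))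
      (PySem.Set.empty, [])).2
  rw [foldlB_eq_goB]
  simp only [List.nil_append]
  congr 1
  apply main_eq
  · decide
  · exact fun x m => m
  · intro c
    constructor
    · intro m
      refine ⟨?_, rfl⟩
      fin_cases m <;> decide
    · rintro ⟨hdm, -⟩
      rw [PySem.Dict.contains_iff_mem_keys] at hdm
      exact hdm
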